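-- pv_equiv track=rewrite | github.com/ansh-logics/verifAI | master-service/search_engine/ranker.py | determine_quality
-- ===== SOURCE A (Python) =====
-- def determine_quality(matched_terms: set[str]) -> str:
--     """Determine match quality based on term types."""
--     has_exact = any(not t.startswith("~") for t in matched_terms)
--     has_fuzzy = any(t.startswith("~") for t in matched_terms)
--
--     if has_exact and has_fuzzy:
--         return "mixed"
--     elif has_exact:
--         return "exact"
--     else:
--         return "fuzzy"
-- ===== SOURCE B (Python) =====
-- def determine_quality(matched_terms: set[str]) -> str:
--     """Determine match quality based on term types (single fused pass, early exit)."""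
--     has_exact = False
--     has_fuzzy = False
--     for t in matched_terms:
--         if t.startswith("~"):
--             has_fuzzy = True
--         else:
--             has_exact = True
--         if has_exact and has_fuzzy:
--             return "mixed"
--     if has_exact:
--         return "exact"
--     return "fuzzy"
-- ===== Notes on version B (the rewrite author's own statement) =====
-- stated objective: alternative
-- what changed: Replaced two independent any() scans over matched_terms with a single fused loop maintaining has_exact/has_fuzzy flags and returning 'mixed' early once both are seen.
import Mathlib
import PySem

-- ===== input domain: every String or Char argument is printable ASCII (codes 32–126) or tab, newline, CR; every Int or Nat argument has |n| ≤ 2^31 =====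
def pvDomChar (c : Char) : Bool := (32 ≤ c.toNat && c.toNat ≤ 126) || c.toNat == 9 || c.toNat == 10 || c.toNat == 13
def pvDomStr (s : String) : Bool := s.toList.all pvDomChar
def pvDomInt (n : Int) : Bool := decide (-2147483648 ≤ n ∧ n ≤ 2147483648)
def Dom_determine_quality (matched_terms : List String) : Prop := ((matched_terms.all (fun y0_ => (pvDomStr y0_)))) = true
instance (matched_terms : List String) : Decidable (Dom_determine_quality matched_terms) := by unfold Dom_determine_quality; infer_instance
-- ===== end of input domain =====

-- B fuses A's two any() scans into one loop with flags and early exit ("alternative", same cost).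
-- ===== PORT A =====
def determine_quality (matched_terms : List String) : String :=
  let has_exact := matched_terms.any (fun t => !(PySem.Str.startswith t "~"))
  let has_fuzzy := matched_terms.any (fun t => PySem.Str.startswith t "~")
  if has_exact && has_fuzzy then "mixed"
  else if has_exact then "exact"
  else "fuzzy"

-- ===== PORT B =====
def dq_loop (ts : List String) (has_exact has_fuzzy : Bool) : String :=
  match ts with
  | [] => if has_exact then "exact" else "fuzzy"
  | t :: rest =>
    let has_fuzzy' := if PySem.Str.startswith t "~" then true else has_fuzzy
    let has_exact' := if PySem.Str.startswith t "~" then has_exact else true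
    if has_exact' && has_fuzzy' then "mixed"
    else dq_loop rest has_exact' has_fuzzy'

def determine_quality_alt (matched_terms : List String) : String :=
  dq_loop matched_terms false false

-- ===== PRECONDITION & SPEC =====
def Spec_determine_quality (matched_terms : List String) (out : String) : Prop := out = determine_quality_alt matched_terms
instance (matched_terms : List String) (out : String) : Decidable (Spec_determine_quality matched_terms out) := by unfold Spec_determine_quality; infer_instance

-- ===== CLAIM (what is proved, stated in full; the proofs are below) =====
def Claim_equal_determine_quality : Prop := ∀ (matched_terms : List String), Dom_determine_quality matched_terms → Spec_determine_quality matched_terms (determine_quality matched_terms)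

-- ===== LEMMAS AND PROOFS =====

-- ===== VERDICT (by name: the statement is the Claim_ definition above) =====
theorem dq_loop_eq (ts : List String) (e f : Bool) (h0 : (e && f) = false) :
    dq_loop ts e f =
      (if (e || ts.any (fun t => !(PySem.Str.startswith t "~"))) &&
          (f || ts.any (fun t => PySem.Str.startswith t "~")) then "mixed"
       else if e || ts.any (fun t => !(PySem.Str.startswith t "~")) then "exact"
       else "fuzzy") := by
  induction ts generalizing e f with
  | nil => cases e <;> cases f <;> simp_all [dq_loop]
  | cons t rest ih =>
    simp only [dq_loop, List.any_cons]
    by_cases h : PySem.Str.startswith t "~" = true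
    · cases e <;> cases f <;> simp_all
    · rw [Bool.not_eq_true] at h
      cases e <;> cases f <;> simp_all

theorem determine_quality_spec : Claim_equal_determine_quality := by
  intro xs _
  show determine_quality xs = determine_quality_alt xs
  simp [determine_quality, determine_quality_alt, dq_loop_eq _ false false rfl]
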